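-- pv_equiv track=rewrite | github.com/PostHog/posthog-foss | posthog/hogql/parse_string.py | replace_common_escape_characters
-- ===== SOURCE A (Python) =====
-- _BACKSLASH_ESCAPE_MAP: dict[str, str] = {
--     "b": "\b",
--     "f": "\f",
--     "r": "\r",
--     "n": "\n",
--     "t": "\t",
--     "0": "",  # NUL characters are ignored
--     "a": "\a",
--     "v": "\v",
--     "\\": "\\",
-- }
--
-- def replace_common_escape_characters(text: str) -> str:
--     # Single-pass left-to-right scan so that an escaped backslash (\\)
--     # is consumed before the next character is inspected.
--     parts: list[str] = []
--     i = 0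
--     length = len(text)
--     while i < length:
--         if text[i] == "\\" and i + 1 < length:
--             next_char = text[i + 1]
--             replacement = _BACKSLASH_ESCAPE_MAP.get(next_char)
--             if replacement is not None:
--                 parts.append(replacement)
--                 i += 2
--                 continue
--         parts.append(text[i])
--         i += 1
--     return "".join(parts)
-- ===== SOURCE B (Python) =====
-- import re
--
-- _BACKSLASH_ESCAPE_MAP: dict[str, str] = {
--     "b": "\b",
--     "f": "\f",
--     "r": "\r",
--     "n": "\n",
--     "t": "\t",
--     "0": "",  # NUL characters are ignored
--     "a": "\a",
--     "v": "\v",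
--     "\\": "\\",
-- }
--
-- def replace_common_escape_characters(text: str) -> str:
--     # One regex substitution: the engine does the left-to-right, non-overlapping
--     # consumption of backslash+char pairs; unmapped pairs are kept verbatim.
--     return re.sub(
--         r"\\(.)",
--         lambda m: _BACKSLASH_ESCAPE_MAP.get(m.group(1), "\\" + m.group(1)),
--         text,
--     )
-- ===== Notes on version B (the rewrite author's own statement) =====
-- stated objective: idiomatic
-- what changed: Replaced the hand-written index-based scan that builds a parts list with a single re.sub over the pattern \\(.) whose callback looks up the escape map with a backslash+char fallback; the regex engine does the pair consumption.
import Mathlib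
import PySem

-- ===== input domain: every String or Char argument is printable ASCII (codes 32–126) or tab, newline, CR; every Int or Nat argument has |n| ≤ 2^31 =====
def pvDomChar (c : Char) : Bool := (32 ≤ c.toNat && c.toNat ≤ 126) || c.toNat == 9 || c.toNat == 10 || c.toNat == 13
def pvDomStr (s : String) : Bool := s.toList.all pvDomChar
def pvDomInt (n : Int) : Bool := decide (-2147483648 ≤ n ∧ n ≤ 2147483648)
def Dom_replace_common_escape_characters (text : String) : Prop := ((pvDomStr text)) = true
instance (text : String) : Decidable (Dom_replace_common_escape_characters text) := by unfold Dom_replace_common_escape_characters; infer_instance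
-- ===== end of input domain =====

-- B replaces A's index-based scan with a single regex substitution (re.sub r"\\(.)" with a map-lookup callback); same output, idiomatic.

-- the module-level _BACKSLASH_ESCAPE_MAP, shared by both versions
def escMap : PySem.Dict Char String :=
  PySem.Dict.ofList
    [('b', "\x08"), ('f', "\x0c"), ('r', "\r"), ('n', "\n"), ('t', "\t"),
     ('0', ""), ('a', "\x07"), ('v', "\x0b"), ('\\', "\\")]

-- ===== PORT A =====
-- A's while loop over index i (appending to `parts`), transliterated as recursion
-- on the remaining characters; a lone final char fails the `i + 1 < length` test.
def goA : List String → List Char → List String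
  | parts, [] => parts
  | parts, [c] => parts ++ [String.ofList [c]]
  | parts, c :: n :: rest2 =>
    if c = '\\' then
      match PySem.Dict.get? escMap n with
      | some r => goA (parts ++ [r]) rest2                       -- replacement: i += 2
      | none   => goA (parts ++ [String.ofList [c]]) (n :: rest2) -- fall through: append text[i]
    else goA (parts ++ [String.ofList [c]]) (n :: rest2)

def replace_common_escape_characters (text : String) : String :=
  String.join (goA [] text.toList)

-- ===== PORT B =====
-- the regex engine's left-to-right non-overlapping scan for r"\\(.)" ('.' matches
-- any char except '\n'), ported by hand (exact for this pattern): at each position,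
-- a backslash followed by a non-newline char is a match replaced by the callback.
def subCallback (n : Char) : String :=
  PySem.Dict.getD escMap n (String.ofList ['\\', n])

def goB : List Char → List Char
  | [] => []
  | [c] => [c]
  | c :: n :: rest2 =>
    if c = '\\' ∧ n ≠ '\n' then (subCallback n).toList ++ goB rest2
    else c :: goB (n :: rest2)

def replace_common_escape_characters_alt (text : String) : String :=
  String.ofList (goB text.toList)

-- ===== PRECONDITION & SPEC =====
def Spec_replace_common_escape_characters (text : String) (out : String) : Prop := out = replace_common_escape_characters_alt text
instance (text : String) (out : String) : Decidable (Spec_replace_common_escape_characters text out) := by unfold Spec_replace_common_escape_characters; infer_instance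

-- ===== CLAIM (what is proved, stated in full; the proofs are below) =====
def Claim_equal_replace_common_escape_characters : Prop := ∀ (text : String), Dom_replace_common_escape_characters text → Spec_replace_common_escape_characters text (replace_common_escape_characters text)

-- ===== LEMMAS AND PROOFS =====

theorem join_append_one (parts : List String) (s : String) :
    String.join (parts ++ [s]) = String.join parts ++ s := by
  induction parts with
  | nil => simp [String.join]
  | cons p ps ih => simp [String.join]

theorem goB_cons_of_ne (n : Char) (rest : List Char) (h : n ≠ '\\') :
    goB (n :: rest) = n :: goB rest := by
  cases rest with
  | nil => simp [goB]
  | cons d ds => rw [goB, if_neg (by simp [h])]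

theorem goA_join (parts : List String) (cs : List Char) :
    String.join (goA parts cs) = String.join parts ++ String.ofList (goB cs) := by
  induction parts, cs using goA.induct with
  | case1 parts =>
    rw [goA, goB, ← String.toList_inj]
    simp
  | case2 parts c => simp [goA, goB, join_append_one]
  | case3 parts n rest2 r hr ih =>
    -- mapped escape: both consume the pair and emit the replacement
    have hnn : n ≠ '\n' := by
      intro h; subst h
      rw [show escMap.get? '\n' = none from by decide] at hr
      exact (Option.some_ne_none r hr.symm).elim
    rw [goA, if_pos rfl, hr, ih, goB, if_pos ⟨rfl, hnn⟩, join_append_one]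
    simp only [subCallback, PySem.Dict.getD, hr]
    rw [← String.toList_inj]
    simp [String.toList_append]
  | case4 parts n rest2 hn ih =>
    -- unmapped next char: A emits '\' then reprocesses n as an ordinary char;
    -- the regex (when it matches) emits the callback fallback "\\" + n
    have hnb : n ≠ '\\' := by
      intro h; subst h; revert hn; decide
    rw [goA, if_pos rfl, hn, ih, join_append_one]
    by_cases h : n = '\n'
    · subst h
      rw [goB, if_neg (by simp), ← String.toList_inj]
      simp [String.toList_append]
    · rw [goB, if_pos ⟨rfl, h⟩, goB_cons_of_ne n rest2 hnb]
      simp only [subCallback, PySem.Dict.getD, hn]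
      rw [← String.toList_inj]
      simp [String.toList_append]
  | case5 parts c n rest2 hc ih =>
    rw [goA, if_neg hc, ih, goB, if_neg (by simp [hc]), join_append_one,
      ← String.toList_inj]
    simp [String.toList_append]

-- ===== VERDICT (by name: the statement is the Claim_ definition above) =====
theorem replace_common_escape_characters_spec : Claim_equal_replace_common_escape_characters := by
  intro text _
  unfold Spec_replace_common_escape_characters replace_common_escape_characters
    replace_common_escape_characters_alt
  rw [goA_join]
  simp [String.join]
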